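-- pv_equiv track=rewrite | github.com/Matteo-Candi/Master-Thesis | results/test_01/test_01_formatted.py | compare_odd_even_range
-- ===== SOURCE A (Python) =====
-- def compare_odd_even_range(numbers):
--     range_odd = max(numbers[i] for i in range(len(numbers)) if numbers[i] % 2 == 1) - min(numbers[i] for i in range(len(numbers)) if numbers[i] % 2 == 1)
--     range_even = max(numbers[i] for i in range(len(numbers)) if numbers[i] % 2 == 0) - min(numbers[i] for i in range(len(numbers)) if numbers[i] % 2 == 0)
--     if range_odd < range_even:
--         return -1
--     elif range_odd > range_even:
--         return 1
--     else:
--         return 0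
-- ===== SOURCE B (Python) =====
-- def compare_odd_even_range(numbers):
--     # one pass: running (min, max) per parity instead of four scans
--     odd = None
--     even = None
--     for n in numbers:
--         if n % 2 == 1:
--             odd = (n, n) if odd is None else (min(odd[0], n), max(odd[1], n))
--         else:
--             even = (n, n) if even is None else (min(even[0], n), max(even[1], n))
--     if odd is None:
--         raise ValueError("no odd numbers")
--     if even is None:
--         raise ValueError("no even numbers")
--     range_odd = odd[1] - odd[0]
--     range_even = even[1] - even[0]
--     if range_odd < range_even:
--         return -1
--     elif range_odd > range_even:
--         return 1
--     else:
--         return 0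
-- ===== Notes on version B (the rewrite author's own statement) =====
-- stated objective: alternative
-- what changed: Replaces A's four separate generator scans (max/min over odds, max/min over evens) with a single traversal maintaining running (min, max) extrema for each parity.
import Mathlib
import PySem

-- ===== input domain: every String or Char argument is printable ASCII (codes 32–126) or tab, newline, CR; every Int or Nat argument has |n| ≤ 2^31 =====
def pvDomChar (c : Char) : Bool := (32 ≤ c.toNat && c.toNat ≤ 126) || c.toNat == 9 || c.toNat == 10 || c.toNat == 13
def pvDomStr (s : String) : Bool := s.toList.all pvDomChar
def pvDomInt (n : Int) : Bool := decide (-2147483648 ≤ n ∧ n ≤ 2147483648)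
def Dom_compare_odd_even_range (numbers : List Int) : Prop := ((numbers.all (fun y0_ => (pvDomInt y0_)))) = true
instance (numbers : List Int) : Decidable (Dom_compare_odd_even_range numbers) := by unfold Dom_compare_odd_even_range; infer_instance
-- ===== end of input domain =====

-- B replaces A's four generator scans (max/min over odds, max/min over evens) with one
-- pass maintaining running (min, max) per parity (same cost); equal wherever A returns (Pre_).

-- ===== PORT A =====
-- 'max(numbers[i] for i in range(len(numbers)) if numbers[i] % 2 == 1)': the generator
-- walks the indices, reads numbers[i] and keeps those with numbers[i] % 2 == 1.
def compare_odd_even_range (numbers : List Int) : Int :=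
  let odds := ((PySem.List.pyRange 0 (PySem.List.len numbers)).map
      (fun i => PySem.List.pyGetD numbers i 0)).filter (fun x => PySem.Int.mod x 2 == 1)
  let evens := ((PySem.List.pyRange 0 (PySem.List.len numbers)).map
      (fun i => PySem.List.pyGetD numbers i 0)).filter (fun x => PySem.Int.mod x 2 == 0)
  -- max()/min() of an empty generator raise ValueError: none here, excluded by Pre_
  let range_odd := (PySem.List.max? odds (fun y => y)).getD 0 - (PySem.List.min? odds (fun y => y)).getD 0
  let range_even := (PySem.List.max? evens (fun y => y)).getD 0 - (PySem.List.min? evens (fun y => y)).getD 0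
  if range_odd < range_even then -1
  else if range_odd > range_even then 1
  else 0

-- ===== PORT B =====
-- running extrema update: None → (n, n); (lo, hi) → (min lo n, max hi n)
def pvUpd (st : Option (Int × Int)) (n : Int) : Option (Int × Int) :=
  match st with
  | none => some (n, n)
  | some (lo, hi) => some (min lo n, max hi n)

def compare_odd_even_range_alt (numbers : List Int) : Int :=
  let st := numbers.foldl
    (fun (st : Option (Int × Int) × Option (Int × Int)) n =>
      if PySem.Int.mod n 2 == 1 then (pvUpd st.1 n, st.2) else (st.1, pvUpd st.2 n))
    (none, none)
  match st with
  | (some (olo, ohi), some (elo, ehi)) =>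
    let range_odd := ohi - olo
    let range_even := ehi - elo
    if range_odd < range_even then -1
    else if range_odd > range_even then 1
    else 0
  | _ => 0   -- Python B raises ValueError here; outside Pre_

-- ===== PRECONDITION & SPEC =====
-- Pre_ excludes inputs without an odd element or without an even element, on which A's
-- max()/min() over an empty generator raises ValueError (B raises ValueError there too).
def Pre_compare_odd_even_range (numbers : List Int) : Prop :=
  (∃ x ∈ numbers, PySem.Int.mod x 2 = 1) ∧ (∃ x ∈ numbers, PySem.Int.mod x 2 = 0)
instance (numbers : List Int) : Decidable (Pre_compare_odd_even_range numbers) := by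
  unfold Pre_compare_odd_even_range; infer_instance

def pvWitness_compare_odd_even_range : List Int := [1, 2, 5, 8]

def Spec_compare_odd_even_range (numbers : List Int) (out : Int) : Prop := out = compare_odd_even_range_alt numbers
instance (numbers : List Int) (out : Int) : Decidable (Spec_compare_odd_even_range numbers out) := by unfold Spec_compare_odd_even_range; infer_instance

-- ===== CLAIM (what is proved, stated in full; the proofs are below) =====
def Claim_equal_compare_odd_even_range : Prop := ∀ (numbers : List Int), Dom_compare_odd_even_range numbers → Pre_compare_odd_even_range numbers → Spec_compare_odd_even_range numbers (compare_odd_even_range numbers)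

-- ===== LEMMAS AND PROOFS =====

-- B's single fold splits into the two per-parity folds over the filtered lists.
theorem pv_fold_split (xs : List Int) (o e : Option (Int × Int)) :
    xs.foldl
      (fun (st : Option (Int × Int) × Option (Int × Int)) n =>
        if PySem.Int.mod n 2 == 1 then (pvUpd st.1 n, st.2) else (st.1, pvUpd st.2 n))
      (o, e)
    = ((xs.filter (fun x => PySem.Int.mod x 2 == 1)).foldl pvUpd o,
       (xs.filter (fun x => PySem.Int.mod x 2 == 0)).foldl pvUpd e) := by
  induction xs generalizing o e with
  | nil => rfl
  | cons x t ih =>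
    rcases PySem.Int.mod_two_eq x with h | h
    · have h1 : (PySem.Int.mod x 2 == 1) = false := by rw [h]; decide
      have h0 : (PySem.Int.mod x 2 == 0) = true := by rw [h]; decide
      simp only [List.foldl_cons, List.filter_cons, h1, h0, Bool.false_eq_true, if_true, if_false, ih]
    · have h1 : (PySem.Int.mod x 2 == 1) = true := by rw [h]; decide
      have h0 : (PySem.Int.mod x 2 == 0) = false := by rw [h]; decide
      simp only [List.foldl_cons, List.filter_cons, h1, h0, Bool.false_eq_true, if_true, if_false, ih]

-- folding pvUpd from a seeded pair is the running min / running max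
theorem pv_fold_upd_some (l : List Int) (lo hi : Int) :
    l.foldl pvUpd (some (lo, hi)) = some (l.foldl min lo, l.foldl max hi) := by
  induction l generalizing lo hi with
  | nil => rfl
  | cons x t ih => simp [List.foldl_cons, pvUpd, ih]

-- folding pvUpd from none over a nonempty list
theorem pv_fold_upd_none (x : Int) (t : List Int) :
    (x :: t).foldl pvUpd none = some (t.foldl min x, t.foldl max x) := by
  simp [List.foldl_cons, pvUpd, pv_fold_upd_some]

-- a nonempty filtered list exists under Pre_'s existential
theorem pv_filter_ne_nil {xs : List Int} {p : Int → Bool} (h : ∃ x ∈ xs, p x = true) :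
    xs.filter p ≠ [] := by
  obtain ⟨x, hx, hp⟩ := h
  intro hnil
  have : x ∈ xs.filter p := List.mem_filter.mpr ⟨hx, hp⟩
  simp [hnil] at this

-- ===== VERDICT (by name: the statement is the Claim_ definition above) =====
theorem compare_odd_even_range_spec : Claim_equal_compare_odd_even_range := by
  intro numbers _ hpre
  obtain ⟨ho, he⟩ := hpre
  unfold Spec_compare_odd_even_range
  simp only [compare_odd_even_range, compare_odd_even_range_alt]
  rw [PySem.List.map_pyGetD_pyRange_zero, pv_fold_split]
  have ho' : numbers.filter (fun x => PySem.Int.mod x 2 == 1) ≠ [] :=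
    pv_filter_ne_nil (by obtain ⟨x, hx, hm⟩ := ho; exact ⟨x, hx, by rw [hm]; decide⟩)
  have he' : numbers.filter (fun x => PySem.Int.mod x 2 == 0) ≠ [] :=
    pv_filter_ne_nil (by obtain ⟨x, hx, hm⟩ := he; exact ⟨x, hx, by rw [hm]; decide⟩)
  obtain ⟨a, ta, ha⟩ := List.exists_cons_of_ne_nil ho'
  obtain ⟨b, tb, hb⟩ := List.exists_cons_of_ne_nil he'
  rw [ha, hb, pv_fold_upd_none, pv_fold_upd_none,
    PySem.List.max?_id_cons, PySem.List.min?_id_cons,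
    PySem.List.max?_id_cons, PySem.List.min?_id_cons]
  rfl
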